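-- pv_equiv track=rewrite | github.com/austenjs/AdventOfCode | 11-12-2023/part1/sol.py | find_expanded_rows
-- ===== SOURCE A (Python) =====
-- def find_expanded_rows(grid, M, N):
--     expanded_rows = set()
--     for i in range(M):
--         count = 0
--         for j in range(N):
--             count += grid[i][j] == '#'
--
--         if count == 0:
--             expanded_rows.add(i)
--     return expanded_rows
-- ===== SOURCE B (Python) =====
-- def find_expanded_rows(grid, M, N):
--     # Column-major sieve: start with all rows as candidates and, column by
--     # column, eliminate every row that shows a '#' in that column; stop as
--     # soon as no candidate is left.
--     candidates = set(range(M))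
--     for j in range(N):
--         if not candidates:
--             break
--         candidates -= {i for i in range(M) if grid[i][j] == '#'}
--     return candidates
-- ===== Notes on version B (the rewrite author's own statement) =====
-- stated objective: alternative
-- what changed: B is a column-major elimination sieve: it starts from the full candidate set of rows and, per column, subtracts the set of rows showing a '#' in that column (stopping early when no candidate remains), instead of A's row-major per-row '#'-counting with a zero test.
import Mathlib
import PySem

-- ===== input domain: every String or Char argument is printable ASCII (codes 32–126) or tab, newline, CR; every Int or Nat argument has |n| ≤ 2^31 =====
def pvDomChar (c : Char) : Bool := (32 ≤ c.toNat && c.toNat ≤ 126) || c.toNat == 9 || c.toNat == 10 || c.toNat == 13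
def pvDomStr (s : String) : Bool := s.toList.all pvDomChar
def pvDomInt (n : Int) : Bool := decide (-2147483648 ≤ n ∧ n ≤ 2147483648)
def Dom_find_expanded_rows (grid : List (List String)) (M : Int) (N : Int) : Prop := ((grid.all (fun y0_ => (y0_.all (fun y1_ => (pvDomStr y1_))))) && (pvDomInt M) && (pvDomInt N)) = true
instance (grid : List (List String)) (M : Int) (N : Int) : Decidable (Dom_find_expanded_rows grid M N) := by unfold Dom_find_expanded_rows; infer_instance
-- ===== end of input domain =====

-- B is a column-major elimination sieve (start from all rows, per column subtract the rows
-- showing a '#' there) instead of A's row-major '#'-counting with a zero test; alternative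
-- decomposition, same cost.

-- ===== PORT A =====
def find_expanded_rows (grid : List (List String)) (M : Int) (N : Int) : List Int :=
  (PySem.List.pyRange 0 M 1).foldl (fun expanded_rows i =>
    let count : Int :=
      (PySem.List.pyRange 0 N 1).foldl (fun count j =>
        count + (if PySem.List.pyGetD (PySem.List.pyGetD grid i []) j "" == "#" then 1 else 0)) 0
    if count = 0 then PySem.Set.add expanded_rows i else expanded_rows)
    (PySem.Set.empty)

-- ===== PORT B =====
-- the 'for j in range(N)' loop with its 'if not candidates: break', as a recursion on the
-- loop counter j (exactly Python's range iterator: stop when j ≥ N or when candidates is empty)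
def pvLoopB (grid : List (List String)) (M : Int) (N : Int) (j : Int) (candidates : List Int) : List Int :=
  if h : j < N then
    if candidates = [] then candidates
    else pvLoopB grid M N (j + 1)
      (PySem.Set.diff candidates
        (PySem.Set.ofList ((PySem.List.pyRange 0 M 1).filter
          (fun i => PySem.List.pyGetD (PySem.List.pyGetD grid i []) j "" == "#"))))
  else candidates
termination_by (N - j).toNat
decreasing_by omega

def find_expanded_rows_alt (grid : List (List String)) (M : Int) (N : Int) : List Int :=
  -- candidates = set(range(M)); per column j: break when empty, else
  -- candidates -= {i in range(M) | grid[i][j]=='#'}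
  pvLoopB grid M N 0 (PySem.Set.ofList (PySem.List.pyRange 0 M 1))

-- ===== PRECONDITION & SPEC =====
-- Pre_ excludes exactly the inputs where Python A raises IndexError: when N > 0 it indexes
-- grid[i][j] for every i < M, j < N, so M must not exceed the number of rows and each of the
-- first M rows must have at least N cells; when N ≤ 0 the inner loop is empty and A never
-- touches grid, so everything is admitted.
def Pre_find_expanded_rows (grid : List (List String)) (M : Int) (N : Int) : Prop :=
  N ≤ 0 ∨ (M ≤ (grid.length : Int) ∧ ∀ row ∈ grid.take M.toNat, N ≤ (row.length : Int))
instance (grid : List (List String)) (M : Int) (N : Int) : Decidable (Pre_find_expanded_rows grid M N) := by unfold Pre_find_expanded_rows; infer_instance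
def pvWitness_find_expanded_rows : List (List String) × Int × Int := ([["#", "."], [".", "."]], 2, 2)
def Spec_find_expanded_rows (grid : List (List String)) (M : Int) (N : Int) (out : List Int) : Prop := out = find_expanded_rows_alt grid M N
instance (grid : List (List String)) (M : Int) (N : Int) (out : List Int) : Decidable (Spec_find_expanded_rows grid M N out) := by unfold Spec_find_expanded_rows; infer_instance

-- ===== CLAIM (what is proved, stated in full; the proofs are below) =====
def Claim_equal_find_expanded_rows : Prop := ∀ (grid : List (List String)) (M : Int) (N : Int), Dom_find_expanded_rows grid M N → Pre_find_expanded_rows grid M N → Spec_find_expanded_rows grid M N (find_expanded_rows grid M N)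

-- ===== LEMMAS AND PROOFS =====

-- A's counting loop is a countP
theorem pv_foldl_count (p : Int → Bool) (l : List Int) (c : Int) :
    l.foldl (fun c j => c + (if p j then 1 else 0)) c = c + (l.countP p : Int) := by
  induction l generalizing c with
  | nil => simp
  | cons a l ih =>
    by_cases h : p a
    · simp [h, ih]; ring
    · simp [h, ih]

-- disjointness bookkeeping for A's fold invariant
theorem pv_disj (a : Int) (l s : List Int) (hd : ∀ i ∈ a :: l, i ∉ s) (ha : a ∉ l) :
    ∀ i ∈ l, i ∉ s ++ [a] := by
  intro i hi hmem
  rcases List.mem_append.mp hmem with hs | hsa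
  · exact hd i (List.mem_cons_of_mem a hi) hs
  · rw [List.mem_singleton.mp hsa] at hi; exact ha hi

-- conditional Set.add fold over a Nodup list disjoint from the accumulator is a filter
theorem pv_foldl_add_filter (q : Int → Prop) [DecidablePred q] (l : List Int) (s : List Int)
    (hd : ∀ i ∈ l, i ∉ s) (hn : l.Nodup) :
    l.foldl (fun s i => if q i then PySem.Set.add s i else s) s
      = s ++ l.filter (fun i => decide (q i)) := by
  induction l generalizing s with
  | nil => simp
  | cons a l ih =>
    rcases List.nodup_cons.mp hn with ⟨ha, hn'⟩
    by_cases h : q a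
    · have hadd : PySem.Set.add s a = s ++ [a] := by
        simp [PySem.Set.add, PySem.Set.contains, hd a (by simp)]
      simp only [List.foldl_cons, h, if_pos, hadd]
      rw [ih (s ++ [a]) (pv_disj a l s hd ha) hn']
      simp [h]
    · simp only [List.foldl_cons, h, if_neg, not_false_iff]
      rw [ih s (fun i hi => hd i (by simp [hi])) hn']
      simp [h]

theorem find_expanded_rows_eq_filter (grid : List (List String)) (M N : Int) :
    find_expanded_rows grid M N =
      (PySem.List.pyRange 0 M 1).filter
        (fun i => ((PySem.List.pyRange 0 N 1).countP
          (fun j => PySem.List.pyGetD (PySem.List.pyGetD grid i []) j "" == "#")) = 0) := by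
  have h := pv_foldl_add_filter
    (fun i => ((PySem.List.pyRange 0 N 1).foldl (fun count j =>
        count + (if PySem.List.pyGetD (PySem.List.pyGetD grid i []) j "" == "#" then 1 else 0))
        (0 : Int)) = 0)
    (PySem.List.pyRange 0 M 1) [] (by simp) (PySem.List.nodup_pyRange_one 0 M)
  refine Eq.trans h ?_
  simp only [List.nil_append]
  apply List.filter_congr
  intro i _
  rw [pv_foldl_count]
  simp [Int.natCast_eq_zero]

-- B-side: the empty-preserving step keeps the empty state
theorem pv_foldl_nil (q : Int → Int → Bool) (cols : List Int) :
    cols.foldl (fun s j => if s = [] then s else s.filter (fun i => !q j i)) [] = [] := by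
  induction cols with
  | nil => rfl
  | cons a cols ih => simpa using ih

-- B-side: a fold of per-column filters (with the break-on-empty guard) is one filter by the
-- conjunction over all columns
theorem pv_foldl_filter (q : Int → Int → Bool) (cols : List Int) (s : List Int) :
    cols.foldl (fun s j => if s = [] then s else s.filter (fun i => !q j i)) s
      = s.filter (fun i => cols.all (fun j => !q j i)) := by
  induction cols generalizing s with
  | nil => simp
  | cons a cols ih =>
    by_cases hs : s = []
    · subst hs
      simpa using pv_foldl_nil q cols
    · simp only [List.foldl_cons, hs, ih, List.all_cons, if_false, List.filter_filter]
      apply List.filter_congr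
      intro i _
      simp [Bool.and_comm]

-- the unconditional Set.add fold: Set.ofList of a Nodup list is itself
theorem pv_foldl_add (l : List Int) (s : List Int)
    (hd : ∀ i ∈ l, i ∉ s) (hn : l.Nodup) : l.foldl PySem.Set.add s = s ++ l := by
  induction l generalizing s with
  | nil => simp
  | cons a l ih =>
    rcases List.nodup_cons.mp hn with ⟨ha, hn'⟩
    have hadd : PySem.Set.add s a = s ++ [a] := by
      simp [PySem.Set.add, PySem.Set.contains, hd a (by simp)]
    simp only [List.foldl_cons, hadd]
    rw [ih (s ++ [a]) (pv_disj a l s hd ha) hn']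
    simp

theorem pv_ofList_nodup (l : List Int) (hn : l.Nodup) : PySem.Set.ofList l = l := by
  rw [PySem.Set.ofList_eq_foldl]
  simpa using pv_foldl_add l [] (by simp) hn

-- any step that fixes [] keeps the fold state []
theorem pv_foldl_fix_nil (f : List Int → Int → List Int) (hf : ∀ j, f [] j = [])
    (l : List Int) : l.foldl f [] = [] := by
  induction l with
  | nil => rfl
  | cons a l ih => simp [hf, ih]

-- the break-recursion is the guarded fold over the remaining range
theorem pvLoopB_eq (grid : List (List String)) (M N : Int) (j : Int) (cand : List Int) :
    pvLoopB grid M N j cand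
      = (PySem.List.pyRange j N 1).foldl
          (fun candidates j =>
            if candidates = [] then candidates else
            PySem.Set.diff candidates
              (PySem.Set.ofList ((PySem.List.pyRange 0 M 1).filter
                (fun i => PySem.List.pyGetD (PySem.List.pyGetD grid i []) j "" == "#"))))
          cand := by
  unfold pvLoopB
  by_cases h : j < N
  · rw [PySem.List.pyRange_one_cons h]
    simp only [h, dif_pos, List.foldl_cons]
    by_cases hc : cand = []
    · subst hc
      exact (pv_foldl_fix_nil _ (fun j => rfl) _).symm
    · simp only [hc, if_neg, not_false_iff]
      exact pvLoopB_eq grid M N (j + 1) _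
  · simp only [dif_neg h]
    rw [show PySem.List.pyRange j N 1 = [] from PySem.List.pyRange_one_eq_nil (by omega)]
    rfl
termination_by (N - j).toNat
decreasing_by omega

theorem find_expanded_rows_alt_eq_filter (grid : List (List String)) (M N : Int) :
    find_expanded_rows_alt grid M N =
      (PySem.List.pyRange 0 M 1).filter
        (fun i => (PySem.List.pyRange 0 N 1).all
          (fun j => !(PySem.List.pyGetD (PySem.List.pyGetD grid i []) j "" == "#"))) := by
  unfold find_expanded_rows_alt
  rw [pvLoopB_eq]
  rw [show PySem.Set.diff = fun (s t : List Int) => s.filter (fun x => !t.contains x) from rfl]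
  refine (pv_foldl_filter (fun j i => (PySem.Set.ofList ((PySem.List.pyRange 0 M 1).filter
        (fun i => PySem.List.pyGetD (PySem.List.pyGetD grid i []) j "" == "#"))).contains i)
      (PySem.List.pyRange 0 N 1) (PySem.Set.ofList (PySem.List.pyRange 0 M 1))).trans ?_
  rw [pv_ofList_nodup _ (PySem.List.nodup_pyRange_one 0 M)]
  apply List.filter_congr
  intro i hi
  have hiM := (PySem.List.mem_pyRange_one).mp hi
  rw [Bool.eq_iff_iff]
  simp only [List.all_eq_true, Bool.not_eq_true']
  constructor
  · intro h j hj
    have := h j hj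
    simp [PySem.Set.contains, PySem.Set.mem_ofList, List.mem_filter, hi] at this
    simpa using this
  · intro h j hj
    have := h j hj
    simp [PySem.Set.contains, PySem.Set.mem_ofList, List.mem_filter, hi]
    simpa using this

-- ===== VERDICT (by name: the statement is the Claim_ definition above) =====
theorem find_expanded_rows_spec : Claim_equal_find_expanded_rows := by
  intro grid M N _ _
  unfold Spec_find_expanded_rows
  rw [find_expanded_rows_eq_filter, find_expanded_rows_alt_eq_filter]
  apply List.filter_congr
  intro i _
  rw [Bool.eq_iff_iff]
  simp [List.countP_eq_zero, List.all_eq_true]
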